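-- pv_equiv track=rewrite | github.com/ghazicc/Crypto_HW2 | source.py | ecb_encrypt
-- ===== SOURCE A (Python) =====
-- def encrypt(plaintext, key):
--     L = plaintext[0]
--     R = plaintext[1]
--     delta = 0x9E3779B9
--     sum = 0
--     for i in range(32):
--         sum = sum + delta
--         L = (L + (((R << 4) + key[0]) ^ (R + sum) ^ ((R >> 5) + key[1]))) % 2 ** 32
--         R = (R + (((L << 4) + key[2]) ^ (L + sum) ^ ((L >> 5) + key[3]))) % 2 ** 32
--
--     ciphertext = (L, R)
--     return ciphertext
--
-- def list_to_tuple(plaintext_list):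
--     L = 0
--     R = 0
--     for i in range(4):
--         L <<= 8
--         c = ord(plaintext_list[i])
--         L += c
--
--     for i in range(4, len(plaintext_list)):
--         R <<= 8
--         c = ord(plaintext_list[i])
--         R += c
--
--     plaintext = (L, R)
--     return plaintext
--
-- def tuple_to_list(ciphertext_tuple):
--     plaintext_list = []
--     for element in ciphertext_tuple:
--         shift = 24
--         mask = 0xFF000000
--         for i in range(4):
--             c = element & mask
--             c = c >> shift
--             plaintext_list.append(chr(c))
--             mask = mask >> 8
--             shift -= 8
--
--     return plaintext_list
--
-- def ecb_encrypt(plaintext, key):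
--     plaintext = list(plaintext)
--     # leave the first 10 blocks unencrypted
--     ciphertext = ''.join(plaintext[:80])
--     plaintext = plaintext[80:]
--     i = 0
--     while i < len(plaintext):
--         # check if last block is encountered
--         block_list = []
--         if (i + 8) > len(plaintext):
--             block_list = plaintext[i:len(plaintext)]
--             # zero-pad the last block
--             while len(block_list) != 8:
--                 block_list.append(chr(0))
--         else:
--             block_list = plaintext[i:i + 8]
--
--         block = list_to_tuple(block_list)
--         cipher = encrypt(block, key)
--         cipher_list = tuple_to_list(cipher)
--         ciphertext = ciphertext + ''.join(cipher_list)
--         i += 8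
--
--     return ciphertext
-- ===== SOURCE B (Python) =====
-- def encrypt(plaintext, key):
--     L = plaintext[0]
--     R = plaintext[1]
--     delta = 0x9E3779B9
--     sum = 0
--     for i in range(32):
--         sum = sum + delta
--         L = (L + (((R << 4) + key[0]) ^ (R + sum) ^ ((R >> 5) + key[1]))) % 2 ** 32
--         R = (R + (((L << 4) + key[2]) ^ (L + sum) ^ ((L >> 5) + key[3]))) % 2 ** 32
--     return (L, R)
--
-- def _unpack(chunk):
--     # 8-char chunk -> (L, R) big-endian
--     L = sum(ord(chunk[k]) << (8 * (3 - k)) for k in range(4))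
--     R = sum(ord(chunk[4 + k]) << (8 * (3 - k)) for k in range(4))
--     return (L, R)
--
-- def _pack(v):
--     return ''.join(chr((v >> s) & 0xFF) for s in (24, 16, 8, 0))
--
-- def ecb_encrypt(plaintext, key):
--     out = plaintext[:80]
--     rest = plaintext[80:]
--     rest += chr(0) * ((-len(rest)) % 8)
--     while rest:
--         c0, c1 = encrypt(_unpack(rest[:8]), key)
--         out += _pack(c0) + _pack(c1)
--         rest = rest[8:]
--     return out
-- ===== Notes on version B (the rewrite author's own statement) =====
-- stated objective: simpler
-- what changed: The padding is hoisted out of the loop (tail zero-padded once to a multiple of 8 with (-len)%8), the per-block 'last block' branch disappears, and the char-list/mask-shift pack-unpack helpers are replaced by direct shift-and-mask byte arithmetic on string chunks; the 32-round TEA core is unchanged.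
import Mathlib
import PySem

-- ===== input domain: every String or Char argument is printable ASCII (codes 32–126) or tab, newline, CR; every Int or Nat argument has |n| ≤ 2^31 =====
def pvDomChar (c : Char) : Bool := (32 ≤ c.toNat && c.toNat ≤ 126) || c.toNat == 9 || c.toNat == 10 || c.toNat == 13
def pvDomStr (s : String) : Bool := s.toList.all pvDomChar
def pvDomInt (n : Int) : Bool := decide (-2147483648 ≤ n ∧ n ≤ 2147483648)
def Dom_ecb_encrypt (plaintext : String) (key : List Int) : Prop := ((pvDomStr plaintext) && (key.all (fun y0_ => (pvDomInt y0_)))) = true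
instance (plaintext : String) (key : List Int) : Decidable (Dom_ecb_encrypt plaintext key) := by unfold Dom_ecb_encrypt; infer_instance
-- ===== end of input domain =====

-- B hoists the zero-padding of the tail out of the block loop and packs/unpacks blocks by
-- direct shift-and-mask byte arithmetic, removing A's per-block last-block branch (objective: simpler).


-- ===== PORT A =====
-- encrypt(plaintext, key): 32-round TEA core; key[i] is pyGetD (Python raises IndexError on a
-- short key — excluded by Pre_); '% 2**32' is PySem.Int.mod; '<<'/'>>'/'^' are <<< / >>> / bxor.
def pyEncryptA (p : Int × Int) (key : List Int) : Int × Int :=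
  let delta : Int := 0x9E3779B9
  let st := (List.range 32).foldl (fun (st : Int × Int × Int) _ =>
    let L := st.1; let R := st.2.1; let s := st.2.2
    let s := s + delta
    let L := PySem.Int.mod
      (L + (PySem.Int.bxor (PySem.Int.bxor ((R <<< (4 : Nat)) + PySem.List.pyGetD key (0 : Int) 0)
              (R + s)) ((R >>> (5 : Nat)) + PySem.List.pyGetD key (1 : Int) 0))) (2 ^ 32)
    let R := PySem.Int.mod
      (R + (PySem.Int.bxor (PySem.Int.bxor ((L <<< (4 : Nat)) + PySem.List.pyGetD key (2 : Int) 0)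
              (L + s)) ((L >>> (5 : Nat)) + PySem.List.pyGetD key (3 : Int) 0))) (2 ^ 32)
    (L, R, s)) (p.1, p.2, 0)
  (st.1, st.2.1)

-- list_to_tuple: two index loops accumulating L and R by 'L = (L << 8) + ord(c)';
-- blk[i] is pyGetD (in every call blk has length 8, so the default is never read).
def list_to_tupleA (blk : List Char) : Int × Int :=
  let L := (PySem.List.pyRange 0 4 1).foldl
    (fun (L : Int) i => (L <<< (8 : Nat)) + ((PySem.List.pyGetD blk i (Char.ofNat 0)).toNat : Int)) 0
  let R := (PySem.List.pyRange 4 (blk.length : Int) 1).foldl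
    (fun (R : Int) i => (R <<< (8 : Nat)) + ((PySem.List.pyGetD blk i (Char.ofNat 0)).toNat : Int)) 0
  (L, R)

-- tuple_to_list: per element, 4 iterations with a running mask/shift; chr(c) on the byte value
-- c (0 ≤ c ≤ 255 here) is Char.ofNat c.toNat.
def tupleElemA (e : Int) : List Char :=
  ((List.range 4).foldl (fun (st : List Char × Int × Nat) _ =>
    let acc := st.1; let mask := st.2.1; let shift := st.2.2
    let c := PySem.Int.band e mask
    let c := c >>> shift
    (acc ++ [Char.ofNat c.toNat], mask >>> (8 : Nat), shift - 8)) ([], 0xFF000000, 24)).1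

def tuple_to_listA (t : Int × Int) : List Char := tupleElemA t.1 ++ tupleElemA t.2

-- inner 'while len(block_list) != 8: block_list.append(chr(0))' (only ever reached with length < 8)
def padTo8A (b : List Char) : List Char :=
  if b.length < 8 then padTo8A (b ++ [Char.ofNat 0]) else b
termination_by 8 - b.length

-- the 'while i < len(plaintext)' loop; p[i:len] / p[i:i+8] with these nonneg in-range bounds are
-- drop/take (exact here)
def ecbLoopA (p : List Char) (key : List Int) (i : Nat) : List Char :=
  if _h : i < p.length then
    let block := if i + 8 > p.length then padTo8A (p.drop i) else (p.drop i).take 8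
    tuple_to_listA (pyEncryptA (list_to_tupleA block) key) ++ ecbLoopA p key (i + 8)
  else []
termination_by p.length - i

def ecb_encrypt (plaintext : String) (key : List Int) : String :=
  let p := plaintext.toList
  String.ofList (p.take 80 ++ ecbLoopA (p.drop 80) key 0)   -- ''.join(plaintext[:80]) then the loop's appends

-- ===== PORT B =====
-- encrypt: same TEA core as in Source B (identical to A's on purpose — Source B keeps it unchanged)
def pyEncryptB (p : Int × Int) (key : List Int) : Int × Int :=
  let delta : Int := 0x9E3779B9
  let st := (List.range 32).foldl (fun (st : Int × Int × Int) _ =>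
    let L := st.1; let R := st.2.1; let s := st.2.2
    let s := s + delta
    let L := PySem.Int.mod
      (L + (PySem.Int.bxor (PySem.Int.bxor ((R <<< (4 : Nat)) + PySem.List.pyGetD key (0 : Int) 0)
              (R + s)) ((R >>> (5 : Nat)) + PySem.List.pyGetD key (1 : Int) 0))) (2 ^ 32)
    let R := PySem.Int.mod
      (R + (PySem.Int.bxor (PySem.Int.bxor ((L <<< (4 : Nat)) + PySem.List.pyGetD key (2 : Int) 0)
              (L + s)) ((L >>> (5 : Nat)) + PySem.List.pyGetD key (3 : Int) 0))) (2 ^ 32)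
    (L, R, s)) (p.1, p.2, 0)
  (st.1, st.2.1)

-- _unpack: sums of ord(chunk[k]) << (8*(3-k)); chunk[k] via pyGetD (chunk always has length 8)
def unpackB (chunk : List Char) : Int × Int :=
  ( ((List.range 4).map (fun k =>
      (((PySem.List.pyGetD chunk (k : Int) (Char.ofNat 0)).toNat : Int) <<< (8 * (3 - k))))).sum,
    ((List.range 4).map (fun k =>
      (((PySem.List.pyGetD chunk ((4 + k : Nat) : Int) (Char.ofNat 0)).toNat : Int) <<< (8 * (3 - k))))).sum )

-- _pack: chr((v >> s) & 0xFF) for s in (24, 16, 8, 0)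
def packB (v : Int) : List Char :=
  ([24, 16, 8, 0] : List Nat).map (fun s => Char.ofNat (PySem.Int.band (v >>> s) 0xFF).toNat)

-- 'while rest:' — one uniform chunk per iteration
def ecbLoopB (rest : List Char) (key : List Int) : List Char :=
  if _h : rest ≠ [] then
    let c := pyEncryptB (unpackB (rest.take 8)) key
    packB c.1 ++ packB c.2 ++ ecbLoopB (rest.drop 8) key
  else []
termination_by rest.length
decreasing_by
  have h0 : 0 < rest.length := List.length_pos_iff.mpr _h
  simp only [List.length_drop]
  omega

-- chr(0) * ((-len(rest)) % 8) — Python '%' is PySem.Int.mod (nonneg result)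
def ecb_encrypt_alt (plaintext : String) (key : List Int) : String :=
  let p := plaintext.toList
  let rest := p.drop 80
  let rest := rest ++ List.replicate (PySem.Int.mod (-(rest.length : Int)) 8).toNat (Char.ofNat 0)
  String.ofList (p.take 80 ++ ecbLoopB rest key)

-- ===== PRECONDITION & SPEC =====
-- Python A raises IndexError (key[0..3] in encrypt) when at least one block exists but the key
-- has fewer than 4 entries; those inputs are excluded.
def Pre_ecb_encrypt (plaintext : String) (key : List Int) : Prop :=
  80 < plaintext.toList.length → 4 ≤ key.length
instance (plaintext : String) (key : List Int) : Decidable (Pre_ecb_encrypt plaintext key) := by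
  unfold Pre_ecb_encrypt; infer_instance

def pvWitness_ecb_encrypt : String × List Int := ("attack at dawn", [1, 2, 3, 4])

def Spec_ecb_encrypt (plaintext : String) (key : List Int) (out : String) : Prop := out = ecb_encrypt_alt plaintext key
instance (plaintext : String) (key : List Int) (out : String) : Decidable (Spec_ecb_encrypt plaintext key out) := by unfold Spec_ecb_encrypt; infer_instance

-- ===== CLAIM (what is proved, stated in full; the proofs are below) =====
def Claim_equal_ecb_encrypt : Prop := ∀ (plaintext : String) (key : List Int), Dom_ecb_encrypt plaintext key → Pre_ecb_encrypt plaintext key → Spec_ecb_encrypt plaintext key (ecb_encrypt plaintext key)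

-- ===== LEMMAS AND PROOFS =====

-- the two TEA cores are the same function (Source B keeps A's encrypt unchanged)
theorem encrypt_eq : pyEncryptA = pyEncryptB := rfl

theorem foldl_step_nonneg {step : Int × Int × Int → Nat → Int × Int × Int}
    (hstep : ∀ st x, 0 ≤ (step st x).1 ∧ 0 ≤ (step st x).2.1) :
    ∀ (l : List Nat) (st : Int × Int × Int), l ≠ [] →
      0 ≤ (List.foldl step st l).1 ∧ 0 ≤ (List.foldl step st l).2.1 := by
  intro l
  induction l with
  | nil => simp
  | cons a t ih =>
    intro st _
    cases t with
    | nil => simpa using hstep st a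
    | cons b t2 => simpa using ih (step st a) (by simp)

theorem pyEncryptA_nonneg (p : Int × Int) (key : List Int) :
    0 ≤ (pyEncryptA p key).1 ∧ 0 ≤ (pyEncryptA p key).2 := by
  simp only [pyEncryptA]
  refine ⟨(foldl_step_nonneg ?_ (List.range 32) (p.1, p.2, 0) (by decide)).1,
          (foldl_step_nonneg ?_ (List.range 32) (p.1, p.2, 0) (by decide)).2⟩ <;>
    exact fun st x => ⟨PySem.Int.mod_nonneg _ (by norm_num), PySem.Int.mod_nonneg _ (by norm_num)⟩

set_option maxHeartbeats 800000 in
theorem unpack_eq (blk : List Char) (h : blk.length = 8) : list_to_tupleA blk = unpackB blk := by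
  match blk, h with
  | [a, b, c, d, e, f, g, h8], _ =>
    simp only [list_to_tupleA, unpackB]
    norm_num [pysem, show List.range 4 = [0, 1, 2, 3] from rfl, Int.shiftLeft_eq, Prod.ext_iff]
    simp only [show Int.toNat 2 = 2 from rfl, show Int.toNat 3 = 3 from rfl,
      show Int.toNat 4 = 4 from rfl, show Int.toNat 5 = 5 from rfl,
      show Int.toNat 6 = 6 from rfl, show Int.toNat 7 = 7 from rfl,
      List.getElem_cons_succ, List.getElem_cons_zero]
    constructor <;>
      · try rw [show ((24 : Int)) = (((24 : Nat)) : Int) from by norm_num,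
              show ((16 : Int)) = (((16 : Nat)) : Int) from by norm_num,
              show ((8 : Int)) = (((8 : Nat)) : Int) from by norm_num]
        try rw [show ((0 : Int)) = (((0 : Nat)) : Int) from rfl]
        try simp only [Int.shiftLeft_eq_mul_pow]
        push_cast
        ring

theorem byte_step (n : Nat) (mask s : Nat) (h : mask >>> s = 0xFF) :
    PySem.Int.band (n : Int) ((mask : Nat) : Int) >>> s
      = PySem.Int.band ((n : Int) >>> s) (((0xFF : Nat) : Nat) : Int) := by
  rw [PySem.Int.band_natCast, ← Int.natCast_shiftRight, ← Int.natCast_shiftRight,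
    PySem.Int.band_natCast, Nat.shiftRight_and_distrib, h]

set_option maxHeartbeats 800000 in
theorem pack_eq (e : Int) (he : 0 ≤ e) : tupleElemA e = packB e := by
  obtain ⟨n, rfl⟩ := Int.eq_ofNat_of_zero_le he
  have e24 := byte_step n 0xFF000000 24 (by decide)
  have e16 := byte_step n 0xFF0000 16 (by decide)
  have e8 := byte_step n 0xFF00 8 (by decide)
  simp only [Nat.cast_ofNat] at e24 e16 e8
  simp only [tupleElemA, packB, show List.range 4 = [0, 1, 2, 3] from rfl,
    List.foldl_cons, List.foldl_nil]
  rw [show ((4278190080 : Int) >>> (8 : Nat)) = 16711680 from by decide,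
      show ((16711680 : Int) >>> (8 : Nat)) = 65280 from by decide,
      show ((65280 : Int) >>> (8 : Nat)) = 255 from by decide]
  rw [e24, e16, e8]
  rfl


theorem padTo8A_eq (b : List Char) (h : b.length ≤ 8) :
    padTo8A b = b ++ List.replicate (8 - b.length) (Char.ofNat 0) := by
  induction b using padTo8A.induct with
  | case1 b hlt ih =>
    rw [padTo8A, if_pos hlt, ih (by simp; omega)]
    simp only [List.append_assoc, List.singleton_append, List.length_append, List.length_cons,
      List.length_nil]
    congr 1
    rw [show 8 - b.length = (8 - (b.length + 1)) + 1 by omega, List.replicate_succ]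
  | case2 b hge =>
    rw [padTo8A, if_neg hge]
    simp only [not_lt] at hge
    have h8 : b.length = 8 := by omega
    simp [h8]

theorem padcount (n : Nat) : (PySem.Int.mod (-(n : Int)) 8).toNat = (8 - n % 8) % 8 := by
  rw [PySem.Int.mod_eq_emod_of_pos (by norm_num)]
  omega

-- the per-block core of the two loops agrees on any 8-char block
theorem encBlock_eq (blk : List Char) (key : List Int) (h : blk.length = 8) :
    tuple_to_listA (pyEncryptA (list_to_tupleA blk) key)
      = packB (pyEncryptB (unpackB blk) key).1 ++ packB (pyEncryptB (unpackB blk) key).2 := by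
  rw [← encrypt_eq, ← unpack_eq blk h]
  unfold tuple_to_listA
  rw [pack_eq _ (pyEncryptA_nonneg _ _).1, pack_eq _ (pyEncryptA_nonneg _ _).2]

theorem pad8_nil :
    ([] : List Char) ++ List.replicate
      (PySem.Int.mod (-(((List.length ([] : List Char)) : Int))) 8).toNat (Char.ofNat 0)
      = ([] : List Char) := by
  simp only [List.length_nil, Nat.cast_zero, neg_zero, List.nil_append]
  rw [show (PySem.Int.mod 0 8).toNat = 0 from rfl, List.replicate_zero]

theorem ecbLoopA_step {p : List Char} {key : List Int} {i : Nat} (hi : i < p.length) :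
    ecbLoopA p key i =
      tuple_to_listA (pyEncryptA (list_to_tupleA
        (if i + 8 > p.length then padTo8A (p.drop i) else (p.drop i).take 8)) key)
      ++ ecbLoopA p key (i + 8) := by
  rw [ecbLoopA, dif_pos hi]

theorem ecbLoopA_stop {p : List Char} {key : List Int} {i : Nat} (hi : ¬ i < p.length) :
    ecbLoopA p key i = [] := by
  rw [ecbLoopA, dif_neg hi]

theorem ecbLoopB_step {rest : List Char} {key : List Int} (hr : rest ≠ []) :
    ecbLoopB rest key =
      packB (pyEncryptB (unpackB (rest.take 8)) key).1
      ++ packB (pyEncryptB (unpackB (rest.take 8)) key).2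
      ++ ecbLoopB (rest.drop 8) key := by
  rw [ecbLoopB, dif_pos hr]

theorem ecbLoopB_stop {key : List Int} : ecbLoopB [] key = [] := by
  rw [ecbLoopB, dif_neg (by simp)]

-- A's indexed while-loop produces exactly B's uniform chunk loop over the padded tail
theorem loopA_eq_aux (p : List Char) (key : List Int) :
    ∀ (n i : Nat), p.length ≤ i + n →
      ecbLoopA p key i =
        ecbLoopB ((p.drop i) ++ List.replicate
          (PySem.Int.mod (-(((p.drop i).length : Int))) 8).toNat (Char.ofNat 0)) key := by
  intro n
  induction n with
  | zero =>
    intro i hn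
    rw [ecbLoopA_stop (by omega), List.drop_eq_nil_of_le (by omega), pad8_nil, ecbLoopB_stop]
  | succ n ih =>
    intro i hn
    by_cases h : i < p.length
    · have hd : (p.drop i).length = p.length - i := List.length_drop
      rw [ecbLoopA_step h]
      by_cases hb : i + 8 > p.length
      · -- last, short block: the padded tail is exactly one 8-char block
        simp only [if_pos hb]
        have hcnt : (PySem.Int.mod (-(((p.drop i).length : Int))) 8).toNat
            = 8 - (p.drop i).length := by rw [padcount]; omega
        have hpad : padTo8A (p.drop i) = (p.drop i) ++ List.replicate
            (PySem.Int.mod (-(((p.drop i).length : Int))) 8).toNat (Char.ofNat 0) := by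
          rw [padTo8A_eq _ (by omega), hcnt]
        have hlen8 : (padTo8A (p.drop i)).length = 8 := by
          rw [hpad]
          simp only [List.length_append, List.length_replicate, hcnt]
          omega
        rw [← hpad]
        rw [ecbLoopB_step (by intro hc; rw [hc] at hlen8; simp at hlen8)]
        rw [show List.take 8 (padTo8A (p.drop i)) = padTo8A (p.drop i) from
              List.take_of_length_le (by omega),
            show List.drop 8 (padTo8A (p.drop i)) = [] from
              List.drop_eq_nil_of_le (by omega),
            ecbLoopB_stop]
        rw [ecbLoopA_stop (show ¬ i + 8 < p.length by omega)]
        rw [encBlock_eq _ key hlen8]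
      · -- interior block of exactly 8 chars
        simp only [if_neg hb]
        have h8 : 8 ≤ (p.drop i).length := by omega
        have hblk8 : ((p.drop i).take 8).length = 8 := by
          simp only [List.length_take]
          omega
        rw [ecbLoopB_step (by
          intro hc
          have := congrArg List.length hc
          simp only [List.length_append, List.length_nil] at this
          omega)]
        rw [List.take_append_of_le_length h8, List.drop_append_of_le_length h8]
        rw [show List.drop 8 (List.drop i p) = List.drop (i + 8) p from List.drop_drop]
        rw [show (PySem.Int.mod (-(((p.drop i).length : Int))) 8).toNat
            = (PySem.Int.mod (-(((p.drop (i + 8)).length : Int))) 8).toNat by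
          rw [padcount, padcount, List.length_drop, List.length_drop]; omega]
        rw [ih (i + 8) (by omega)]
        rw [encBlock_eq _ key hblk8]
    · rw [ecbLoopA_stop h, List.drop_eq_nil_of_le (by omega), pad8_nil, ecbLoopB_stop]

theorem loopA_eq (p : List Char) (key : List Int) :
    ecbLoopA p key 0 =
      ecbLoopB (p ++ List.replicate
        (PySem.Int.mod (-((p.length : Int))) 8).toNat (Char.ofNat 0)) key := by
  have h := loopA_eq_aux p key p.length 0 (by omega)
  simpa using h

-- ===== VERDICT (by name: the statement is the Claim_ definition above) =====
theorem ecb_encrypt_spec : Claim_equal_ecb_encrypt := by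
  intro plaintext key _ _
  show ecb_encrypt plaintext key = ecb_encrypt_alt plaintext key
  show String.ofList (plaintext.toList.take 80 ++ ecbLoopA (plaintext.toList.drop 80) key 0)
      = String.ofList (plaintext.toList.take 80 ++ ecbLoopB ((plaintext.toList.drop 80)
          ++ List.replicate
            (PySem.Int.mod (-((((plaintext.toList.drop 80)).length : Int))) 8).toNat
            (Char.ofNat 0)) key)
  rw [loopA_eq]
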